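-- pv_equiv track=rewrite | github.com/PanDanil-prog/Greenatom_test_backend | Task_3.py | tags_count
-- ===== SOURCE A (Python) =====
-- def tags_count(content_string: str) -> tuple:
--     counter_tags = counter_attrtags = 0
--     flag_inside_tag = False
--
--     for char in content_string:
--         if char == '>':
--             flag_inside_tag = False
--     # Отслеживаем нахождение внутри тега
--         if char == '<':
--             flag_inside_tag = True
--             counter_tags += 1
--             continue
--     # Если после тега будет пробел, то тег содержит аттрибуты
--         if flag_inside_tag:
--             if char == ' ':
--                 counter_attrtags += 1
--                 flag_inside_tag = False
--
--     return counter_tags, counter_attrtags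
-- ===== SOURCE B (Python) =====
-- def tags_count(content_string: str) -> tuple:
--     # Split once on '<': every piece after the first corresponds to one tag
--     # opening; the tag has attributes iff a space occurs before the tag closes.
--     parts = content_string.split('<')
--     counter_attrtags = sum(1 for seg in parts[1:] if ' ' in seg.split('>', 1)[0])
--     return len(parts) - 1, counter_attrtags
-- ===== Notes on version B (the rewrite author's own statement) =====
-- stated objective: faster
-- what changed: Replaces A's stateful per-character scan with a single split on '<' plus a per-segment test for a space before the first '>' (tag count = number of pieces minus one).
import Mathlib
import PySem

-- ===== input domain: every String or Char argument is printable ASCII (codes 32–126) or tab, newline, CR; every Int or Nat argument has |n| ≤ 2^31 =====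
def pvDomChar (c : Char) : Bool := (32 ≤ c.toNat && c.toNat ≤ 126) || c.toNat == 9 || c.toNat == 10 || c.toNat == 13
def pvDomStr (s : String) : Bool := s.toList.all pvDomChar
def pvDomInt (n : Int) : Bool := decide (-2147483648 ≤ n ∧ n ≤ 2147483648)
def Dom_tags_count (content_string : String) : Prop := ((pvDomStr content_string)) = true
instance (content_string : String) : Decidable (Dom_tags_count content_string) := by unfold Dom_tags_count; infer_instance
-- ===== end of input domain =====

-- B replaces A's stateful per-character scan by one split on '<' plus a
-- per-segment "space before the first '>'" test (objective: faster in CPython by constant factor).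

-- ===== PORT A =====
-- the body of A's for-loop; state = (counter_tags, counter_attrtags, flag_inside_tag)
def tagsStep (st : Int × Int × Bool) (char : Char) : Int × Int × Bool :=
  let counter_tags := st.1
  let counter_attrtags := st.2.1
  let flag_inside_tag := st.2.2
  let flag_inside_tag := if char = '>' then false else flag_inside_tag
  if char = '<' then (counter_tags + 1, counter_attrtags, true)
  else if flag_inside_tag then
    (if char = ' ' then (counter_tags, counter_attrtags + 1, false)
     else (counter_tags, counter_attrtags, flag_inside_tag))
  else (counter_tags, counter_attrtags, flag_inside_tag)

def tags_count (content_string : String) : Int × Int :=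
  let fin := content_string.toList.foldl tagsStep (0, 0, false)
  (fin.1, fin.2.1)

-- ===== PORT B =====
-- "' ' in seg.split('>', 1)[0]": seg.split('>', 1)[0] is exactly the maximal
-- '>'-free prefix of seg, so the test is `contains ' '` on that prefix (exact).
def segAttr (seg : List Char) : Bool :=
  (seg.takeWhile (fun c => c != '>')).contains ' '

def tags_count_alt (content_string : String) : Int × Int :=
  let parts := content_string.toList.splitOn '<'   -- content_string.split('<'), exact for a 1-char sep
  let counter_attrtags := (PySem.List.slice parts (some 1) none).countP segAttr   -- parts[1:]
  ((parts.length : Int) - 1, (counter_attrtags : Int))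

-- ===== PRECONDITION & SPEC =====
def Spec_tags_count (content_string : String) (out : Int × Int) : Prop := out = tags_count_alt content_string
instance (content_string : String) (out : Int × Int) : Decidable (Spec_tags_count content_string out) := by unfold Spec_tags_count; infer_instance

-- ===== CLAIM (what is proved, stated in full; the proofs are below) =====
def Claim_equal_tags_count : Prop := ∀ (content_string : String), Dom_tags_count content_string → Spec_tags_count content_string (tags_count content_string)

-- ===== LEMMAS AND PROOFS =====

theorem splitOn_cons_sep (cs : List Char) :
    ('<' :: cs).splitOn '<' = [] :: cs.splitOn '<' := by
  simp [List.splitOn, List.splitOnP_cons]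

theorem splitOn_cons_ne (c : Char) (cs : List Char) (hc : c ≠ '<') :
    (c :: cs).splitOn '<' = (cs.splitOn '<').modifyHead (c :: ·) := by
  simp [List.splitOn, List.splitOnP_cons, hc]

-- number of pieces = number of separators + 1
theorem splitOn_length (l : List Char) :
    (l.splitOn '<').length = l.count '<' + 1 := by
  induction l with
  | nil => simp [List.splitOn, List.splitOnP_nil]
  | cons c cs ih =>
    by_cases hc : c = '<'
    · subst hc; simp [splitOn_cons_sep, ih]
    · simp [splitOn_cons_ne c cs hc, ih, hc]

theorem splitOn_ne_nil (l : List Char) : l.splitOn '<' ≠ [] := by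
  intro h
  have := splitOn_length l
  rw [h] at this
  simp at this

-- contribution of the current segment while the flag is set
def segCost (seg : List Char) : Int := if segAttr seg then 1 else 0

theorem segAttr_gt (x : List Char) : segAttr ('>' :: x) = false := by
  simp [segAttr]

theorem segAttr_space (x : List Char) : segAttr (' ' :: x) = true := by
  simp [segAttr]

theorem segAttr_cons (c : Char) (x : List Char) (h1 : c ≠ '>') (h2 : c ≠ ' ') :
    segAttr (c :: x) = segAttr x := by
  simp only [segAttr, List.takeWhile_cons]
  simp [h1, show ¬ (' ' = c) from fun h => h2 h.symm]

-- attribute count of all segments after the first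
def attrTail (l : List Char) : Int := (((l.splitOn '<').drop 1).countP segAttr : Nat)

-- head segment of the split
def hdSeg (l : List Char) : List Char := (l.splitOn '<').headI

theorem foldl_fst (l : List Char) : ∀ (t a : Int) (f : Bool),
    (l.foldl tagsStep (t, a, f)).1 = t + l.count '<' := by
  induction l with
  | nil => intro t a f; simp
  | cons c cs ih =>
    intro t a f
    simp only [List.foldl_cons, tagsStep]
    split_ifs <;> rw [ih] <;> simp [List.count_cons, *]
    omega

theorem foldl_snd (l : List Char) : ∀ (t a : Int) (f : Bool),
    (l.foldl tagsStep (t, a, f)).2.1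
      = a + (if f then segCost (hdSeg l) else 0) + attrTail l := by
  induction l with
  | nil =>
    intro t a f
    simp [hdSeg, attrTail, segCost, segAttr, List.splitOn, List.splitOnP_nil]
  | cons c cs ih =>
    intro t a f
    obtain ⟨x, xs, hx⟩ := List.exists_cons_of_ne_nil (splitOn_ne_nil cs)
    by_cases hc : c = '<'
    · subst hc
      simp only [List.foldl_cons, tagsStep]
      norm_num
      rw [ih]
      simp only [hdSeg, attrTail, splitOn_cons_sep, hx, List.headI, List.drop_succ_cons, List.drop_zero, List.countP_cons, segCost]
      by_cases hseg : segAttr x <;> simp [hseg, segAttr] <;> push_cast <;> ring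
    · have hsplit : (c :: cs).splitOn '<' = (c :: x) :: xs := by
        rw [splitOn_cons_ne c cs hc, hx, List.modifyHead_cons]
      have hhd : hdSeg (c :: cs) = c :: x := by simp [hdSeg, hsplit]
      have hhd' : hdSeg cs = x := by simp [hdSeg, hx]
      have htl : attrTail (c :: cs) = attrTail cs := by
        simp [attrTail, hsplit, hx]
      simp only [List.foldl_cons, tagsStep, if_neg hc]
      by_cases hf : f
      · subst hf
        by_cases hgt : c = '>'
        · subst hgt
          norm_num
          rw [ih]
          simp [hhd, htl, segCost, segAttr_gt]
        · by_cases hsp : c = ' '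
          · subst hsp
            simp only [if_neg hgt]
            norm_num
            rw [ih]
            simp [hhd, htl, segCost, segAttr_space]
          · simp only [if_neg hgt]
            norm_num [hsp]
            rw [ih]
            simp [hhd, hhd', htl, segCost, segAttr_cons c x hgt hsp]
      · simp only [Bool.not_eq_true] at hf
        subst hf
        norm_num
        rw [ih]
        simp [htl]

-- ===== VERDICT (by name: the statement is the Claim_ definition above) =====
theorem tags_count_spec : Claim_equal_tags_count := by
  intro s _
  unfold Spec_tags_count tags_count tags_count_alt
  have hslice : PySem.List.slice (s.toList.splitOn '<') (some 1) none
      = (s.toList.splitOn '<').drop 1 := by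
    rw [PySem.List.slice_from _ (by norm_num : (0:Int) ≤ 1)]
    norm_num
  simp only [hslice]
  refine Prod.ext ?_ ?_
  · simp only [foldl_fst s.toList 0 0 false, splitOn_length]
    push_cast
    ring
  · simp only [foldl_snd s.toList 0 0 false]
    simp [attrTail]
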